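-- pv_equiv track=rewrite | github.com/miliar/Code_Jam_Webscraper | solutions_python/solutions_year17_round0_nr1/3641.py | check_if_happy
-- ===== SOURCE A (Python) =====
-- def check_if_happy(cakes):
--     i = 0
--     for sid in cakes:
--         if sid == '+':
--             i += 1
--     if i == len(cakes):
--         return True
--     else:
--         return False
-- ===== SOURCE B (Python) =====
-- def check_if_happy(cakes):
--     return set(cakes) <= {'+'}
-- ===== Notes on version B (the rewrite author's own statement) =====
-- stated objective: idiomatic
-- what changed: Replaces the count-matches-then-compare-to-length loop with building the set of distinct elements and one subset test against {'+'}.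
import Mathlib
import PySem

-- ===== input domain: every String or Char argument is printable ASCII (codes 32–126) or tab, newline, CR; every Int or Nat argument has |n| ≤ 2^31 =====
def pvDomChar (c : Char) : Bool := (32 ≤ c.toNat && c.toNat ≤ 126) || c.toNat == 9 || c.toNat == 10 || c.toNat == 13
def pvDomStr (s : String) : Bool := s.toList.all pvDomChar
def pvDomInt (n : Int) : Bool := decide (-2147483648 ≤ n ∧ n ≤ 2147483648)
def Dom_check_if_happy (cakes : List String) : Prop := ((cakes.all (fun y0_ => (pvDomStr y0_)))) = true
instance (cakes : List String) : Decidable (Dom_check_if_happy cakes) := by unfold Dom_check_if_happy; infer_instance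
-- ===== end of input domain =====

-- B replaces A's count-and-compare loop by a distinct-element-set subset test (idiomatic).

-- ===== PORT A =====
def check_if_happy (cakes : List String) : Bool :=
  let i : Int := cakes.foldl (fun i sid => if sid == "+" then i + 1 else i) 0
  decide (i = (cakes.length : Int))

-- ===== PORT B =====
def check_if_happy_alt (cakes : List String) : Bool :=
  PySem.Set.issubset (PySem.Set.ofList cakes) ["+"]

-- ===== PRECONDITION & SPEC =====
def Spec_check_if_happy (cakes : List String) (out : Bool) : Prop := out = check_if_happy_alt cakes
instance (cakes : List String) (out : Bool) : Decidable (Spec_check_if_happy cakes out) := by unfold Spec_check_if_happy; infer_instance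

-- ===== CLAIM (what is proved, stated in full; the proofs are below) =====
def Claim_equal_check_if_happy : Prop := ∀ (cakes : List String), Dom_check_if_happy cakes → Spec_check_if_happy cakes (check_if_happy cakes)

-- ===== LEMMAS AND PROOFS =====
theorem count_loop_eq (cakes : List String) (n : Int) :
    cakes.foldl (fun i sid => if sid == "+" then i + 1 else i) n
      = n + (cakes.count "+" : Int) := by
  induction cakes generalizing n with
  | nil => simp
  | cons x xs ih =>
    simp only [List.foldl_cons, ih, List.count_cons]
    by_cases h : x = "+" <;> simp [h] <;> push_cast <;> ring

theorem count_eq_length_iff (cakes : List String) :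
    cakes.count "+" = cakes.length ↔ ∀ x ∈ cakes, x = "+" := by
  rw [List.count_eq_length]
  constructor
  · intro h x hx; simpa using (h x hx).symm
  · intro h x hx; simpa using (h x hx).symm

-- ===== VERDICT (by name: the statement is the Claim_ definition above) =====
theorem check_if_happy_spec : Claim_equal_check_if_happy := by
  intro cakes _
  unfold Spec_check_if_happy check_if_happy check_if_happy_alt
  have hsub : PySem.Set.issubset (PySem.Set.ofList cakes) ["+"] = true
      ↔ ∀ x ∈ cakes, x = "+" := by
    rw [PySem.Set.issubset_iff]
    constructor
    · intro h x hx
      have := h x ((PySem.Set.mem_ofList _ _).mpr hx)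
      simpa using this
    · intro h x hx
      have := h x ((PySem.Set.mem_ofList _ _).mp hx)
      simp [this]
  simp only [count_loop_eq, zero_add]
  rcases Bool.eq_false_or_eq_true (PySem.Set.issubset (PySem.Set.ofList cakes) ["+"]) with hb | hb
  · rw [hb]
    have h1 := hsub.mp hb
    have h2 := (count_eq_length_iff cakes).mpr h1
    simp [h2]
  · rw [hb]
    have : ¬ ∀ x ∈ cakes, x = "+" := fun h => by rw [hsub.mpr h] at hb; cases hb
    rw [← count_eq_length_iff] at this
    simp only [decide_eq_false_iff_not]
    omega
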